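-- pv_equiv track=rewrite | github.com/bethany-wong/advenntofcode2024 | day12.py | find_sides
-- ===== SOURCE A (Python) =====
-- from collections import defaultdict
--
-- def is_corner(a, b):
--     intersection = set(a).intersection(set(b))
--     if len(intersection) != 1:
--         return None
--     if a[0][0] == a[1][0] == b[0][0] == b[1][0] or a[0][1] == a[1][1] == b[0][1] == b[1][1]:
--         return None
--     return intersection
--
-- def find_sides(edges):
--     horizontal_edges = defaultdict(list)
--     vertical_edges = defaultdict(list)
--     for edge in edges:
--         a_row, a_col = edge[0]
--         b_row, b_col = edge[1]
--         if a_row == b_row: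
--             horizontal_edges[a_row].append(tuple(sorted([a_col, b_col])))
--         else:
--             vertical_edges[a_col].append(tuple(sorted([a_row, b_row])))
--     corners_count = 0
--     points = defaultdict(int)
--     edges = list(edges)
--     for i in range(len(edges) - 1):
--         for j in range(i+1, len(edges)):
--             point = is_corner(edges[i], edges[j])
--             if point is not None:
--                 point = tuple(list(point))
--                 if points[point] < 2:
--                     points[point] += 1
--                     corners_count += 1
--     return corners_count
-- ===== SOURCE B (Python) =====
-- from collections import defaultdict
--
-- def find_sides(edges):
--     edges = list(edges)
--     incident = defaultdict(list)
--     for e in edges: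
--         incident[e[0]].append(e)
--         if e[1] != e[0]:
--             incident[e[1]].append(e)
--     total = 0
--     for es in incident.values():
--         c = 0
--         for k in range(len(es)):
--             a = es[k]
--             for b in es[k + 1:]:
--                 if len(set(a) & set(b)) == 1 and not (
--                     a[0][0] == a[1][0] == b[0][0] == b[1][0]
--                     or a[0][1] == a[1][1] == b[0][1] == b[1][1]
--                 ):
--                     c += 1
--         total += min(2, c)
--     return total
-- ===== Notes on version B (the rewrite author's own statement) =====
-- stated objective: faster
-- what changed: B builds an endpoint-to-incident-edges index in one pass and counts corner pairs only among the edges meeting at each point (capped at 2 per point), replacing A's scan over all O(n^2) edge pairs with a global capped-counter dict.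
import Mathlib
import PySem

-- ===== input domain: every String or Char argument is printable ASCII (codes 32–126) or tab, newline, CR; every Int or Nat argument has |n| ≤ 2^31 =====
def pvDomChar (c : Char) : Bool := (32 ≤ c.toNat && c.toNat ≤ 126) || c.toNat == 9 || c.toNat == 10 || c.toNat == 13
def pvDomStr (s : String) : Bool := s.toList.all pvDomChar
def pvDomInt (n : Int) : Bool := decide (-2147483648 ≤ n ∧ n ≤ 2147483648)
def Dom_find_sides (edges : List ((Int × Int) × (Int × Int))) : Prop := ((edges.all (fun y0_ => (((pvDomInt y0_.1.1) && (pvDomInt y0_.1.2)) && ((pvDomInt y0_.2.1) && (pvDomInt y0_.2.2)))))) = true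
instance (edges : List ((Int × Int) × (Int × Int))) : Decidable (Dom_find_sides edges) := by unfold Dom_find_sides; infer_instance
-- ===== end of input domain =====

-- B groups edges by endpoint once and counts corner pairs only among edges incident to
-- each shared point, instead of A's scan over all pairs of edges (objective: faster).

-- ===== PORT A =====

-- port of A's helper is_corner: the unique shared endpoint of a and b (None → none);
-- Python returns the 1-element set, used by the caller only as a dict key, so the
-- point itself is the faithful key value.
def pvIsCorner (a b : (Int × Int) × (Int × Int)) : Option (Int × Int) :=
  let inter := PySem.Set.inter (PySem.Set.ofList [a.1, a.2]) (PySem.Set.ofList [b.1, b.2])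
  if inter.length ≠ 1 then none
  else if (a.1.1 = a.2.1 ∧ a.2.1 = b.1.1 ∧ b.1.1 = b.2.1) ∨
          (a.1.2 = a.2.2 ∧ a.2.2 = b.1.2 ∧ b.1.2 = b.2.2) then none
  else inter.head?

def find_sides (edges : List ((Int × Int) × (Int × Int))) : Int :=
  -- horizontal_edges / vertical_edges: built exactly as in A and, as in A, never read
  let _hv : PySem.Dict Int (List (Int × Int)) × PySem.Dict Int (List (Int × Int)) :=
    edges.foldl (fun hv e =>
      if e.1.1 = e.2.1 then
        let s := PySem.List.sorted [e.1.2, e.2.2] (fun x => x) false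
        (hv.1.modify e.1.1 [] (· ++ [(s.getD 0 0, s.getD 1 0)]), hv.2)
      else
        let s := PySem.List.sorted [e.1.1, e.2.1] (fun x => x) false
        (hv.1, hv.2.modify e.1.2 [] (· ++ [(s.getD 0 0, s.getD 1 0)])))
      (PySem.Dict.empty, PySem.Dict.empty)
  let n : Int := PySem.List.len edges
  let st :=
    (PySem.List.pyRange 0 (n - 1) 1).foldl (fun st i =>
      (PySem.List.pyRange (i + 1) n 1).foldl (fun st j =>
        match pvIsCorner (PySem.List.pyGetD edges i (((0:Int),(0:Int)),((0:Int),(0:Int))))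
                         (PySem.List.pyGetD edges j (((0:Int),(0:Int)),((0:Int),(0:Int)))) with
        | none => st
        | some p => if st.1.getD p 0 < 2 then (st.1.insert p (st.1.getD p 0 + 1), st.2 + 1) else st)
        st)
      ((PySem.Dict.empty : PySem.Dict (Int × Int) Int), (0 : Int))
  st.2

-- ===== PORT B =====
def find_sides_alt (edges : List ((Int × Int) × (Int × Int))) : Int :=
  let incident : PySem.Dict (Int × Int) (List ((Int × Int) × (Int × Int))) :=
    edges.foldl (fun d e =>
      let d := d.modify e.1 [] (· ++ [e])
      if e.2 ≠ e.1 then d.modify e.2 [] (· ++ [e]) else d)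
      PySem.Dict.empty
  incident.values.foldl (fun total es =>
    let c : Int :=
      (PySem.List.pyRange 0 (PySem.List.len es) 1).foldl (fun c k =>
        let a := PySem.List.pyGetD es k (((0:Int),(0:Int)),((0:Int),(0:Int)))
        (PySem.List.slice es (some (k + 1)) none).foldl (fun c b =>
          if (PySem.Set.inter (PySem.Set.ofList [a.1, a.2]) (PySem.Set.ofList [b.1, b.2])).length = 1 ∧
             ¬ ((a.1.1 = a.2.1 ∧ a.2.1 = b.1.1 ∧ b.1.1 = b.2.1) ∨
                (a.1.2 = a.2.2 ∧ a.2.2 = b.1.2 ∧ b.1.2 = b.2.2))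
          then c + 1 else c) c) 0
    total + min 2 c) 0

-- ===== PRECONDITION & SPEC =====
def Spec_find_sides (edges : List ((Int × Int) × (Int × Int))) (out : Int) : Prop := out = find_sides_alt edges
instance (edges : List ((Int × Int) × (Int × Int))) (out : Int) : Decidable (Spec_find_sides edges out) := by unfold Spec_find_sides; infer_instance

-- ===== CLAIM (what is proved, stated in full; the proofs are below) =====
def Claim_equal_find_sides : Prop := ∀ (edges : List ((Int × Int) × (Int × Int))), Dom_find_sides edges → Spec_find_sides edges (find_sides edges)

-- ===== LEMMAS AND PROOFS =====

-- the default value used by both ports for in-range pyGetD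
def pvD : (Int × Int) × (Int × Int) := ((0, 0), (0, 0))

-- all ordered pairs (earlier, later) of a list, in A's (and B's) iteration order
def pvPairs {α : Type} : List α → List (α × α)
  | [] => []
  | x :: t => t.map (fun y => (x, y)) ++ pvPairs t

-- the corner points of all pairs, A's iteration order
def pvPts (es : List ((Int × Int) × (Int × Int))) : List (Int × Int) :=
  (pvPairs es).filterMap (fun q => pvIsCorner q.1 q.2)

-- A's per-pair dict/counter update
def pvStep (st : PySem.Dict (Int × Int) Int × Int) (p : Int × Int) :
    PySem.Dict (Int × Int) Int × Int :=
  if st.1.getD p 0 < 2 then (st.1.insert p (st.1.getD p 0 + 1), st.2 + 1) else st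

-- one (key, edge) entry per distinct endpoint, B's insertion order
def pvEKeys (e : (Int × Int) × (Int × Int)) : List ((Int × Int) × ((Int × Int) × (Int × Int))) :=
  if e.2 = e.1 then [(e.1, e)] else [(e.1, e), (e.2, e)]

lemma mem_pvPairs {α : Type} {l : List α} {q : α × α} (h : q ∈ pvPairs l) :
    q.1 ∈ l ∧ q.2 ∈ l := by
  induction l with
  | nil => simp [pvPairs] at h
  | cons x t ih =>
    simp only [pvPairs, List.mem_append, List.mem_map] at h
    rcases h with ⟨y, hy, rfl⟩ | h
    · simp [hy]
    · rcases ih h with ⟨h1, h2⟩; simp [h1, h2]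

-- the generic triangular double loop, both ports' shape after range/slice rewriting
lemma pvFold_drop {σ : Type} (g : σ → ((Int × Int) × (Int × Int)) → ((Int × Int) × (Int × Int)) → σ)
    (es : List ((Int × Int) × (Int × Int))) :
    ∀ (k : Nat) (st : σ), k ≤ es.length →
      (PySem.List.pyRange (k : Int) (es.length : Int) 1).foldl
        (fun st i => (es.drop ((i + 1).toNat)).foldl
          (fun st b => g st (PySem.List.pyGetD es i pvD) b) st) st
      = (pvPairs (es.drop k)).foldl (fun st q => g st q.1 q.2) st := by
  intro k
  induction hn : es.length - k generalizing k with
  | zero =>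
    intro st hk
    have hk' : k = es.length := by omega
    subst hk'
    rw [PySem.List.pyRange_one_eq_nil (by omega)]
    simp [pvPairs]
  | succ n ih =>
    intro st hk
    have hlt : k < es.length := by omega
    rw [PySem.List.pyRange_one_cons (by exact_mod_cast hlt)]
    rw [List.foldl_cons]
    have hdrop : es.drop k = es[k] :: es.drop (k + 1) := List.drop_eq_getElem_cons hlt
    have hget : PySem.List.pyGetD es (k : Int) pvD = es[k] := by
      simp [PySem.List.pyGetD_natCast, List.getD_eq_getElem?_getD, hlt]
    have htn : ((k : Int) + 1).toNat = k + 1 := by omega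
    rw [hdrop]
    simp only [pvPairs, List.foldl_append, List.foldl_map, hget, htn]
    have : ((k : Int) + 1) = ((k + 1 : Nat) : Int) := by push_cast; ring
    rw [this, ih (k + 1) (by omega) _ (by omega)]

lemma pvFoldl_filterMap {α β σ : Type} (L : List α) (f : α → Option β)
    (step : σ → β → σ) : ∀ (st : σ),
    L.foldl (fun st q => (f q).elim st (step st)) st
      = (L.filterMap f).foldl step st := by
  induction L with
  | nil => intro st; simp
  | cons x t ih =>
    intro st
    cases hfx : f x <;> simp [hfx, ih]

-- A's capped dict loop computes the per-point capped sum
lemma pvCap_foldl (l : List (Int × Int)) :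
    ∀ (d : PySem.Dict (Int × Int) Int) (c : Int),
      (∀ p, 0 ≤ d.getD p 0 ∧ d.getD p 0 ≤ 2) →
      (l.foldl pvStep (d, c)).2
        = c + ∑ p ∈ l.toFinset, (min 2 (d.getD p 0 + (l.count p : Int)) - d.getD p 0) := by
  induction l with
  | nil => intro d c _; simp
  | cons p t ih =>
    intro d c hinv
    rw [List.foldl_cons]
    by_cases h : d.getD p 0 < 2
    · have hstep : pvStep (d, c) p = (d.insert p (d.getD p 0 + 1), c + 1) := by
        simp [pvStep, h]
      rw [hstep, ih _ _ (by
        intro q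
        rw [PySem.Dict.getD_insert]
        split_ifs with hq
        · subst hq; have := hinv q; omega
        · exact hinv q)]
      have hkey : ∑ q ∈ (p :: t).toFinset, (min 2 (d.getD q 0 + ((p :: t).count q : Int)) - d.getD q 0)
          = 1 + ∑ q ∈ t.toFinset,
              (min 2 ((d.insert p (d.getD p 0 + 1)).getD q 0 + (t.count q : Int))
                - (d.insert p (d.getD p 0 + 1)).getD q 0) := by
        by_cases hp : p ∈ t.toFinset
        · have hins : (p :: t).toFinset = t.toFinset := by
            simp [List.toFinset_cons, Finset.insert_eq_self.mpr hp]
          rw [hins]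
          rw [← Finset.add_sum_erase _ _ hp, ← Finset.add_sum_erase _ _ hp]
          have hterm : min 2 (d.getD p 0 + ((p :: t).count p : Int)) - d.getD p 0
              = 1 + (min 2 ((d.insert p (d.getD p 0 + 1)).getD p 0 + (t.count p : Int))
                  - (d.insert p (d.getD p 0 + 1)).getD p 0) := by
            rw [PySem.Dict.getD_insert_self, List.count_cons_self]
            have hc : (0:Int) ≤ (t.count p : Int) := by positivity
            push_cast
            omega
          rw [hterm]
          have hrest : ∑ q ∈ t.toFinset.erase p, (min 2 (d.getD q 0 + ((p :: t).count q : Int)) - d.getD q 0)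
              = ∑ q ∈ t.toFinset.erase p,
                  (min 2 ((d.insert p (d.getD p 0 + 1)).getD q 0 + (t.count q : Int))
                    - (d.insert p (d.getD p 0 + 1)).getD q 0) := by
            apply Finset.sum_congr rfl
            intro q hq
            have hqp : q ≠ p := Finset.ne_of_mem_erase hq
            rw [PySem.Dict.getD_insert, if_neg hqp, List.count_cons_of_ne (Ne.symm hqp)]
          rw [hrest]; ring
        · have hcnt : t.count p = 0 := by
            rw [List.count_eq_zero]; simpa using hp
          rw [List.toFinset_cons, Finset.sum_insert hp]
          have hterm : min 2 (d.getD p 0 + ((p :: t).count p : Int)) - d.getD p 0 = 1 := by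
            rw [List.count_cons_self, hcnt]
            push_cast
            omega
          rw [hterm]
          have hrest : ∑ q ∈ t.toFinset, (min 2 (d.getD q 0 + ((p :: t).count q : Int)) - d.getD q 0)
              = ∑ q ∈ t.toFinset,
                  (min 2 ((d.insert p (d.getD p 0 + 1)).getD q 0 + (t.count q : Int))
                    - (d.insert p (d.getD p 0 + 1)).getD q 0) := by
            apply Finset.sum_congr rfl
            intro q hq
            have hqp : q ≠ p := by rintro rfl; exact hp hq
            rw [PySem.Dict.getD_insert, if_neg hqp, List.count_cons_of_ne (Ne.symm hqp)]
          rw [hrest]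
      rw [hkey]; ring
    · have hx : d.getD p 0 = 2 := by have := hinv p; omega
      have hstep : pvStep (d, c) p = (d, c) := by simp [pvStep, h]
      rw [hstep, ih _ _ hinv]
      have hkey : ∑ q ∈ (p :: t).toFinset, (min 2 (d.getD q 0 + ((p :: t).count q : Int)) - d.getD q 0)
          = ∑ q ∈ t.toFinset, (min 2 (d.getD q 0 + (t.count q : Int)) - d.getD q 0) := by
        by_cases hp : p ∈ t.toFinset
        · have hins : (p :: t).toFinset = t.toFinset := by
            simp [List.toFinset_cons, Finset.insert_eq_self.mpr hp]
          rw [hins]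
          apply Finset.sum_congr rfl
          intro q hq
          by_cases hqp : q = p
          · subst hqp
            rw [hx, List.count_cons_self]
            have hc : (0:Int) ≤ (t.count q : Int) := by positivity
            push_cast
            omega
          · rw [List.count_cons_of_ne (Ne.symm hqp)]
        · rw [List.toFinset_cons, Finset.sum_insert hp]
          have hcnt : t.count p = 0 := by rw [List.count_eq_zero]; simpa using hp
          have hterm : min 2 (d.getD p 0 + ((p :: t).count p : Int)) - d.getD p 0 = 0 := by
            rw [List.count_cons_self, hcnt, hx]; norm_num
          rw [hterm]
          have : ∑ q ∈ t.toFinset, (min 2 (d.getD q 0 + ((p :: t).count q : Int)) - d.getD q 0)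
              = ∑ q ∈ t.toFinset, (min 2 (d.getD q 0 + (t.count q : Int)) - d.getD q 0) := by
            apply Finset.sum_congr rfl
            intro q hq
            have hqp : q ≠ p := by rintro rfl; exact hp hq
            rw [List.count_cons_of_ne (Ne.symm hqp)]
          rw [this]; ring
      rw [hkey]

lemma find_sides_eq_sum (edges : List ((Int × Int) × (Int × Int))) :
    find_sides edges
      = ∑ p ∈ (pvPts edges).toFinset, min 2 (((pvPts edges).count p : Int)) := by
  have h1 : find_sides edges
      = ((PySem.List.pyRange 0 ((edges.length : Int) - 1) 1).foldl (fun st (i : Int) =>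
          (edges.drop ((i + 1).toNat)).foldl (fun st b =>
            (pvIsCorner (PySem.List.pyGetD edges i pvD) b).elim st (pvStep st)) st)
          ((PySem.Dict.empty : PySem.Dict (Int × Int) Int), (0 : Int))).2 := by
    unfold find_sides
    simp only [PySem.List.len_eq]
    congr 1
    apply PySem.List.foldl_congr_mem
    intro st i hi
    have hi0 : (0:Int) ≤ i + 1 := by
      have := (PySem.List.mem_pyRange_one.mp hi).1; omega
    rw [PySem.List.foldl_pyRange_pyGetD' (d := (((0:Int),(0:Int)),((0:Int),(0:Int))))
      (xs := edges) (f := fun (st : PySem.Dict (Int × Int) Int × Int) b =>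
        match pvIsCorner (PySem.List.pyGetD edges i (((0:Int),(0:Int)),((0:Int),(0:Int)))) b with
        | none => st
        | some p => if st.1.getD p 0 < 2 then (st.1.insert p (st.1.getD p 0 + 1), st.2 + 1) else st)
      (ha := hi0)]
    simp only [pvD]
    apply PySem.List.foldl_congr_mem
    intro st' b _
    cases h : pvIsCorner (PySem.List.pyGetD edges i (((0:Int),(0:Int)),((0:Int),(0:Int)))) b <;>
      simp [pvStep]
  rw [h1]
  set F := fun (st : PySem.Dict (Int × Int) Int × Int) (i : Int) =>
      (edges.drop ((i + 1).toNat)).foldl (fun st b =>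
        (pvIsCorner (PySem.List.pyGetD edges i pvD) b).elim st (pvStep st)) st with hF
  have h2 : (PySem.List.pyRange 0 ((edges.length : Int) - 1) 1).foldl F
        ((PySem.Dict.empty : PySem.Dict (Int × Int) Int), (0 : Int))
      = (PySem.List.pyRange 0 (edges.length : Int) 1).foldl F
        ((PySem.Dict.empty : PySem.Dict (Int × Int) Int), (0 : Int)) := by
    rcases Nat.eq_zero_or_pos edges.length with h0 | hpos
    · rw [h0]; norm_num
    · have hb : (0:Int) ≤ (edges.length : Int) - 1 := by omega
      have : (PySem.List.pyRange 0 (edges.length : Int) 1)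
          = PySem.List.pyRange 0 ((edges.length : Int) - 1) 1 ++ [(edges.length : Int) - 1] := by
        have := PySem.List.pyRange_one_succ_right (a := 0) (b := (edges.length : Int) - 1) hb
        rw [← this]; norm_num
      rw [this, List.foldl_append]
      simp only [List.foldl_cons, List.foldl_nil, hF]
      have hdrop : (edges.drop (((edges.length : Int) - 1 + 1).toNat)) = [] := by
        apply List.drop_eq_nil_of_le; omega
      rw [hdrop]
      rfl
  rw [h2]
  have h3 := pvFold_drop
    (g := fun st a b => (pvIsCorner a b).elim st (pvStep st))
    edges 0 ((PySem.Dict.empty : PySem.Dict (Int × Int) Int), (0 : Int)) (by omega)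
  simp only [Nat.cast_zero, List.drop_zero] at h3
  rw [h3, pvFoldl_filterMap (pvPairs edges) (fun q => pvIsCorner q.1 q.2) pvStep]
  rw [pvCap_foldl _ _ _ (by intro p; simp [PySem.Dict.getD_empty])]
  simp only [PySem.Dict.getD_empty, pvPts, zero_add, sub_zero]

-- B's incidence lists, abstractly
def pvInc (p : Int × Int) (edges : List ((Int × Int) × (Int × Int))) :
    List ((Int × Int) × (Int × Int)) :=
  edges.filter (fun e => e.1 == p || e.2 == p)

def pvEnds (edges : List ((Int × Int) × (Int × Int))) : List (Int × Int) :=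
  (edges.flatMap pvEKeys).map (·.1)

lemma pvIncident_eq (edges : List ((Int × Int) × (Int × Int))) :
    ∀ d : PySem.Dict (Int × Int) (List ((Int × Int) × (Int × Int))),
      edges.foldl (fun d e =>
        let d := d.modify e.1 [] (· ++ [e])
        if e.2 ≠ e.1 then d.modify e.2 [] (· ++ [e]) else d) d
      = (edges.flatMap pvEKeys).foldl (fun d p => d.modify p.1 [] (· ++ [p.2])) d := by
  induction edges with
  | nil => intro d; rfl
  | cons e t ih =>
    intro d
    rw [List.foldl_cons, List.flatMap_cons, List.foldl_append, ih]
    congr 1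
    by_cases he : e.2 = e.1 <;> simp [pvEKeys, he]

lemma pvFilter_flatMap (p : Int × Int) (edges : List ((Int × Int) × (Int × Int))) :
    ((edges.flatMap pvEKeys).filter (fun q => q.1 == p)).map (·.2) = pvInc p edges := by
  induction edges with
  | nil => rfl
  | cons e t ih =>
    rw [List.flatMap_cons, List.filter_append, List.map_append, ih]
    unfold pvInc
    rw [List.filter_cons]
    unfold pvEKeys
    by_cases he : e.2 = e.1
    · rw [if_pos he]
      by_cases h1 : e.1 = p <;> simp [he, h1]
    · rw [if_neg he]
      by_cases h1 : e.1 = p <;> by_cases h2 : e.2 = p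
      · exact absurd (h2.trans h1.symm) he
      · simp [h1, h2]
      · simp [h1, h2]
      · simp [h1, h2]

lemma pvCorner_endpoint {a b : (Int × Int) × (Int × Int)} {p : Int × Int}
    (h : pvIsCorner a b = some p) :
    (p = a.1 ∨ p = a.2) ∧ (p = b.1 ∨ p = b.2) := by
  unfold pvIsCorner at h
  simp only at h
  split_ifs at h
  have hmem : p ∈ PySem.Set.inter (PySem.Set.ofList [a.1, a.2]) (PySem.Set.ofList [b.1, b.2]) := by
    exact List.mem_of_mem_head? (by simpa using h)
  rw [PySem.Set.mem_inter] at hmem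
  constructor
  · have := hmem.1; rw [PySem.Set.mem_ofList] at this; simpa using this
  · have := hmem.2; rw [PySem.Set.mem_ofList] at this; simpa using this

lemma pvCond_iff {a b : (Int × Int) × (Int × Int)} {p : Int × Int}
    (ha : p = a.1 ∨ p = a.2) (hb : p = b.1 ∨ p = b.2) :
    ((PySem.Set.inter (PySem.Set.ofList [a.1, a.2]) (PySem.Set.ofList [b.1, b.2])).length = 1 ∧
      ¬ ((a.1.1 = a.2.1 ∧ a.2.1 = b.1.1 ∧ b.1.1 = b.2.1) ∨
         (a.1.2 = a.2.2 ∧ a.2.2 = b.1.2 ∧ b.1.2 = b.2.2)))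
      ↔ pvIsCorner a b = some p := by
  have hmem : p ∈ PySem.Set.inter (PySem.Set.ofList [a.1, a.2]) (PySem.Set.ofList [b.1, b.2]) := by
    rw [PySem.Set.mem_inter, PySem.Set.mem_ofList, PySem.Set.mem_ofList]
    constructor
    · rcases ha with rfl | rfl <;> simp
    · rcases hb with rfl | rfl <;> simp
  unfold pvIsCorner
  simp only
  constructor
  · rintro ⟨hlen, hcol⟩
    rw [if_neg (by omega), if_neg hcol]
    rcases List.length_eq_one_iff.mp hlen with ⟨x, hx⟩
    rw [hx] at hmem ⊢
    simp at hmem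
    simp [hmem]
  · intro h
    split_ifs at h with h1 h2
    exact ⟨by omega, h2⟩

lemma pvCountP_pairs_filter {α : Type} (Q : α → Bool) (R : α × α → Bool)
    (hR : ∀ q, R q = true → Q q.1 = true ∧ Q q.2 = true) :
    ∀ l : List α, (pvPairs (l.filter Q)).countP R = (pvPairs l).countP R := by
  intro l
  induction l with
  | nil => rfl
  | cons x t ih =>
    rw [List.filter_cons]
    by_cases hx : Q x
    · rw [if_pos hx]
      simp only [pvPairs, List.countP_append, List.countP_map, ih]
      congr 1
      rw [List.countP_filter]
      apply List.countP_congr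
      intro y _
      simp only [Function.comp]
      constructor
      · rintro h; exact (Bool.and_eq_true _ _).mp h |>.1
      · intro h; simp [h, (hR (x, y) h).2]
    · rw [if_neg hx, ih]
      simp only [pvPairs, List.countP_append, List.countP_map]
      have : t.countP (R ∘ fun y => (x, y)) = 0 := by
        apply List.countP_eq_zero.mpr
        intro y _ hy
        exact hx ((hR (x, y) hy).1)
      omega

lemma pvInner_eq (es : List ((Int × Int) × (Int × Int))) :
    (PySem.List.pyRange 0 (PySem.List.len es) 1).foldl (fun c (k : Int) =>
        (PySem.List.slice es (some (k + 1)) none).foldl (fun (c : Int) b =>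
          if (PySem.Set.inter (PySem.Set.ofList [(PySem.List.pyGetD es k (((0:Int),(0:Int)),((0:Int),(0:Int)))).1,
                (PySem.List.pyGetD es k (((0:Int),(0:Int)),((0:Int),(0:Int)))).2])
              (PySem.Set.ofList [b.1, b.2])).length = 1 ∧
             ¬ (((PySem.List.pyGetD es k (((0:Int),(0:Int)),((0:Int),(0:Int)))).1.1 = (PySem.List.pyGetD es k (((0:Int),(0:Int)),((0:Int),(0:Int)))).2.1 ∧ (PySem.List.pyGetD es k (((0:Int),(0:Int)),((0:Int),(0:Int)))).2.1 = b.1.1 ∧ b.1.1 = b.2.1) ∨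
                ((PySem.List.pyGetD es k (((0:Int),(0:Int)),((0:Int),(0:Int)))).1.2 = (PySem.List.pyGetD es k (((0:Int),(0:Int)),((0:Int),(0:Int)))).2.2 ∧ (PySem.List.pyGetD es k (((0:Int),(0:Int)),((0:Int),(0:Int)))).2.2 = b.1.2 ∧ b.1.2 = b.2.2))
          then c + 1 else c) c) 0
    = (((pvPairs es).countP (fun q =>
        decide ((PySem.Set.inter (PySem.Set.ofList [q.1.1, q.1.2]) (PySem.Set.ofList [q.2.1, q.2.2])).length = 1 ∧
          ¬ ((q.1.1.1 = q.1.2.1 ∧ q.1.2.1 = q.2.1.1 ∧ q.2.1.1 = q.2.2.1) ∨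
             (q.1.1.2 = q.1.2.2 ∧ q.1.2.2 = q.2.1.2 ∧ q.2.1.2 = q.2.2.2)))) : Nat) : Int) := by
  have h1 : (PySem.List.pyRange 0 (PySem.List.len es) 1).foldl (fun c (k : Int) =>
        (PySem.List.slice es (some (k + 1)) none).foldl (fun (c : Int) b =>
          if (PySem.Set.inter (PySem.Set.ofList [(PySem.List.pyGetD es k (((0:Int),(0:Int)),((0:Int),(0:Int)))).1,
                (PySem.List.pyGetD es k (((0:Int),(0:Int)),((0:Int),(0:Int)))).2])
              (PySem.Set.ofList [b.1, b.2])).length = 1 ∧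
             ¬ (((PySem.List.pyGetD es k (((0:Int),(0:Int)),((0:Int),(0:Int)))).1.1 = (PySem.List.pyGetD es k (((0:Int),(0:Int)),((0:Int),(0:Int)))).2.1 ∧ (PySem.List.pyGetD es k (((0:Int),(0:Int)),((0:Int),(0:Int)))).2.1 = b.1.1 ∧ b.1.1 = b.2.1) ∨
                ((PySem.List.pyGetD es k (((0:Int),(0:Int)),((0:Int),(0:Int)))).1.2 = (PySem.List.pyGetD es k (((0:Int),(0:Int)),((0:Int),(0:Int)))).2.2 ∧ (PySem.List.pyGetD es k (((0:Int),(0:Int)),((0:Int),(0:Int)))).2.2 = b.1.2 ∧ b.1.2 = b.2.2))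
          then c + 1 else c) c) 0
      = (PySem.List.pyRange 0 ((es.length : Int)) 1).foldl (fun c (k : Int) =>
          (es.drop ((k + 1).toNat)).foldl (fun (c : Int) b =>
            (fun (a b : (Int × Int) × (Int × Int)) (c : Int) =>
              if (PySem.Set.inter (PySem.Set.ofList [a.1, a.2]) (PySem.Set.ofList [b.1, b.2])).length = 1 ∧
                 ¬ ((a.1.1 = a.2.1 ∧ a.2.1 = b.1.1 ∧ b.1.1 = b.2.1) ∨
                    (a.1.2 = a.2.2 ∧ a.2.2 = b.1.2 ∧ b.1.2 = b.2.2))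
              then c + 1 else c) (PySem.List.pyGetD es k pvD) b c) c) 0 := by
    simp only [PySem.List.len_eq]
    apply PySem.List.foldl_congr_mem
    intro c k hk
    have hk0 : (0:Int) ≤ k + 1 := by
      have := (PySem.List.mem_pyRange_one.mp hk).1; omega
    rw [PySem.List.slice_from es hk0]
    simp only [pvD]
    rfl
  rw [h1]
  have h2 := pvFold_drop
    (g := fun (c : Int) a b =>
      if (PySem.Set.inter (PySem.Set.ofList [a.1, a.2]) (PySem.Set.ofList [b.1, b.2])).length = 1 ∧
         ¬ ((a.1.1 = a.2.1 ∧ a.2.1 = b.1.1 ∧ b.1.1 = b.2.1) ∨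
            (a.1.2 = a.2.2 ∧ a.2.2 = b.1.2 ∧ b.1.2 = b.2.2))
      then c + 1 else c)
    es 0 (0 : Int) (by omega)
  simp only [Nat.cast_zero, List.drop_zero] at h2
  rw [h2]
  rw [PySem.List.foldl_ite_add_one]
  ring

lemma pvPoint_eq (p : Int × Int) (edges : List ((Int × Int) × (Int × Int))) :
    (pvPairs (pvInc p edges)).countP (fun q =>
        decide ((PySem.Set.inter (PySem.Set.ofList [q.1.1, q.1.2]) (PySem.Set.ofList [q.2.1, q.2.2])).length = 1 ∧
          ¬ ((q.1.1.1 = q.1.2.1 ∧ q.1.2.1 = q.2.1.1 ∧ q.2.1.1 = q.2.2.1) ∨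
             (q.1.1.2 = q.1.2.2 ∧ q.1.2.2 = q.2.1.2 ∧ q.2.1.2 = q.2.2.2))))
      = (pvPts edges).count p := by
  have hstep1 : (pvPairs (pvInc p edges)).countP (fun q =>
        decide ((PySem.Set.inter (PySem.Set.ofList [q.1.1, q.1.2]) (PySem.Set.ofList [q.2.1, q.2.2])).length = 1 ∧
          ¬ ((q.1.1.1 = q.1.2.1 ∧ q.1.2.1 = q.2.1.1 ∧ q.2.1.1 = q.2.2.1) ∨
             (q.1.1.2 = q.1.2.2 ∧ q.1.2.2 = q.2.1.2 ∧ q.2.1.2 = q.2.2.2))))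
      = (pvPairs (pvInc p edges)).countP (fun q => pvIsCorner q.1 q.2 == some p) := by
    apply List.countP_congr
    intro q hq
    rcases mem_pvPairs hq with ⟨h1, h2⟩
    have e1 : p = q.1.1 ∨ p = q.1.2 := by
      have := List.of_mem_filter h1
      simp only [Bool.or_eq_true, beq_iff_eq] at this
      tauto
    have e2 : p = q.2.1 ∨ p = q.2.2 := by
      have := List.of_mem_filter h2
      simp only [Bool.or_eq_true, beq_iff_eq] at this
      tauto
    simp only [decide_eq_true_eq, beq_iff_eq]
    exact pvCond_iff e1 e2
  rw [hstep1]
  unfold pvInc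
  rw [pvCountP_pairs_filter (fun e => e.1 == p || e.2 == p)
    (fun q => pvIsCorner q.1 q.2 == some p)
    (by
      intro q hq
      rw [beq_iff_eq] at hq
      rcases pvCorner_endpoint hq with ⟨h1, h2⟩
      constructor
      · simp only [Bool.or_eq_true, beq_iff_eq]; tauto
      · simp only [Bool.or_eq_true, beq_iff_eq]; tauto) edges]
  rw [pvPts, List.count_filterMap]

lemma find_sides_alt_eq_sum (edges : List ((Int × Int) × (Int × Int))) :
    find_sides_alt edges
      = ∑ p ∈ (pvPts edges).toFinset, min 2 (((pvPts edges).count p : Int)) := by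
  have hD := pvIncident_eq edges PySem.Dict.empty
  set D := (edges.flatMap pvEKeys).foldl (fun d p => d.modify p.1 [] (· ++ [p.2])) PySem.Dict.empty with hDdef
  have hnodup : D.keys.Nodup := by
    apply PySem.Dict.nodup_keys_foldl_modify_key
    exact PySem.Dict.nodup_keys_empty
  have hkeys : D.keys = PySem.Set.ofList (pvEnds edges) := by
    rw [hDdef, PySem.Dict.keys_foldl_modify_key (edges.flatMap pvEKeys) (fun (q : (Int × Int) × ((Int × Int) × (Int × Int))) => q.1) [] (fun _ q => fun v => v ++ [q.2])]
    rw [PySem.Dict.keys_empty, PySem.Set.update_nil_left]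
    rfl
  have hgetD : ∀ q, D.getD q [] = pvInc q edges := by
    intro q
    rw [hDdef, PySem.Dict.getD_foldl_modify_append, PySem.Dict.getD_empty, List.nil_append,
      pvFilter_flatMap]
  have hvals : D.values = (PySem.Set.ofList (pvEnds edges)).map (fun q => pvInc q edges) := by
    rw [PySem.Dict.values_eq_map_keys D hnodup [], hkeys]
    apply List.map_congr_left
    intro q _
    exact hgetD q
  have h0 : find_sides_alt edges = D.values.foldl (fun total es =>
      total + min 2 ((PySem.List.pyRange 0 (PySem.List.len es) 1).foldl (fun c (k : Int) =>
        (PySem.List.slice es (some (k + 1)) none).foldl (fun (c : Int) b =>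
          if (PySem.Set.inter (PySem.Set.ofList [(PySem.List.pyGetD es k (((0:Int),(0:Int)),((0:Int),(0:Int)))).1,
                (PySem.List.pyGetD es k (((0:Int),(0:Int)),((0:Int),(0:Int)))).2])
              (PySem.Set.ofList [b.1, b.2])).length = 1 ∧
             ¬ (((PySem.List.pyGetD es k (((0:Int),(0:Int)),((0:Int),(0:Int)))).1.1 = (PySem.List.pyGetD es k (((0:Int),(0:Int)),((0:Int),(0:Int)))).2.1 ∧ (PySem.List.pyGetD es k (((0:Int),(0:Int)),((0:Int),(0:Int)))).2.1 = b.1.1 ∧ b.1.1 = b.2.1) ∨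
                ((PySem.List.pyGetD es k (((0:Int),(0:Int)),((0:Int),(0:Int)))).1.2 = (PySem.List.pyGetD es k (((0:Int),(0:Int)),((0:Int),(0:Int)))).2.2 ∧ (PySem.List.pyGetD es k (((0:Int),(0:Int)),((0:Int),(0:Int)))).2.2 = b.1.2 ∧ b.1.2 = b.2.2))
          then c + 1 else c) c) 0)) 0 := by
    unfold find_sides_alt
    rw [hD]
  rw [h0]
  have h1 : ∀ es, (PySem.List.pyRange 0 (PySem.List.len es) 1).foldl (fun c (k : Int) =>
        (PySem.List.slice es (some (k + 1)) none).foldl (fun (c : Int) b =>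
          if (PySem.Set.inter (PySem.Set.ofList [(PySem.List.pyGetD es k (((0:Int),(0:Int)),((0:Int),(0:Int)))).1,
                (PySem.List.pyGetD es k (((0:Int),(0:Int)),((0:Int),(0:Int)))).2])
              (PySem.Set.ofList [b.1, b.2])).length = 1 ∧
             ¬ (((PySem.List.pyGetD es k (((0:Int),(0:Int)),((0:Int),(0:Int)))).1.1 = (PySem.List.pyGetD es k (((0:Int),(0:Int)),((0:Int),(0:Int)))).2.1 ∧ (PySem.List.pyGetD es k (((0:Int),(0:Int)),((0:Int),(0:Int)))).2.1 = b.1.1 ∧ b.1.1 = b.2.1) ∨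
                ((PySem.List.pyGetD es k (((0:Int),(0:Int)),((0:Int),(0:Int)))).1.2 = (PySem.List.pyGetD es k (((0:Int),(0:Int)),((0:Int),(0:Int)))).2.2 ∧ (PySem.List.pyGetD es k (((0:Int),(0:Int)),((0:Int),(0:Int)))).2.2 = b.1.2 ∧ b.1.2 = b.2.2))
          then c + 1 else c) c) 0
      = (((pvPairs es).countP (fun q =>
          decide ((PySem.Set.inter (PySem.Set.ofList [q.1.1, q.1.2]) (PySem.Set.ofList [q.2.1, q.2.2])).length = 1 ∧
            ¬ ((q.1.1.1 = q.1.2.1 ∧ q.1.2.1 = q.2.1.1 ∧ q.2.1.1 = q.2.2.1) ∨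
               (q.1.1.2 = q.1.2.2 ∧ q.1.2.2 = q.2.1.2 ∧ q.2.1.2 = q.2.2.2)))) : Nat) : Int) :=
    pvInner_eq
  have h2 : D.values.foldl (fun total es => total + min 2 ((PySem.List.pyRange 0 (PySem.List.len es) 1).foldl (fun c (k : Int) =>
        (PySem.List.slice es (some (k + 1)) none).foldl (fun (c : Int) b =>
          if (PySem.Set.inter (PySem.Set.ofList [(PySem.List.pyGetD es k (((0:Int),(0:Int)),((0:Int),(0:Int)))).1,
                (PySem.List.pyGetD es k (((0:Int),(0:Int)),((0:Int),(0:Int)))).2])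
              (PySem.Set.ofList [b.1, b.2])).length = 1 ∧
             ¬ (((PySem.List.pyGetD es k (((0:Int),(0:Int)),((0:Int),(0:Int)))).1.1 = (PySem.List.pyGetD es k (((0:Int),(0:Int)),((0:Int),(0:Int)))).2.1 ∧ (PySem.List.pyGetD es k (((0:Int),(0:Int)),((0:Int),(0:Int)))).2.1 = b.1.1 ∧ b.1.1 = b.2.1) ∨
                ((PySem.List.pyGetD es k (((0:Int),(0:Int)),((0:Int),(0:Int)))).1.2 = (PySem.List.pyGetD es k (((0:Int),(0:Int)),((0:Int),(0:Int)))).2.2 ∧ (PySem.List.pyGetD es k (((0:Int),(0:Int)),((0:Int),(0:Int)))).2.2 = b.1.2 ∧ b.1.2 = b.2.2))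
          then c + 1 else c) c) 0)) 0
      = D.values.foldl (fun total es => total + min 2
          (((pvPairs es).countP (fun q =>
            decide ((PySem.Set.inter (PySem.Set.ofList [q.1.1, q.1.2]) (PySem.Set.ofList [q.2.1, q.2.2])).length = 1 ∧
              ¬ ((q.1.1.1 = q.1.2.1 ∧ q.1.2.1 = q.2.1.1 ∧ q.2.1.1 = q.2.2.1) ∨
                 (q.1.1.2 = q.1.2.2 ∧ q.1.2.2 = q.2.1.2 ∧ q.2.1.2 = q.2.2.2)))) : Int)) ) 0 := by
    apply PySem.List.foldl_congr_mem
    intro acc es _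
    rw [h1]
  rw [h2, hvals, List.foldl_map]
  rw [PySem.List.foldl_add (g := fun q => min 2
      (((pvPairs (pvInc q edges)).countP (fun q =>
        decide ((PySem.Set.inter (PySem.Set.ofList [q.1.1, q.1.2]) (PySem.Set.ofList [q.2.1, q.2.2])).length = 1 ∧
          ¬ ((q.1.1.1 = q.1.2.1 ∧ q.1.2.1 = q.2.1.1 ∧ q.2.1.1 = q.2.2.1) ∨
             (q.1.1.2 = q.1.2.2 ∧ q.1.2.2 = q.2.1.2 ∧ q.2.1.2 = q.2.2.2)))) : Int)))]
  rw [zero_add]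
  rw [List.map_congr_left (fun q _ => by rw [pvPoint_eq q edges])]
  rw [← List.sum_toFinset _ (PySem.Set.nodup_ofList (pvEnds edges))]
  have hsub : (pvPts edges).toFinset ⊆ (PySem.Set.ofList (pvEnds edges)).toFinset := by
    intro p hp
    rw [List.mem_toFinset] at hp ⊢
    rw [PySem.Set.mem_ofList]
    rcases List.mem_filterMap.mp hp with ⟨q, hq, hsome⟩
    have hmem := (mem_pvPairs hq).1
    rcases (pvCorner_endpoint hsome).1 with h1 | h1
    · unfold pvEnds
      rw [List.mem_map]
      refine ⟨(q.1.1, q.1), ?_, h1.symm⟩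
      rw [List.mem_flatMap]
      refine ⟨q.1, hmem, ?_⟩
      unfold pvEKeys
      split_ifs <;> simp
    · unfold pvEnds
      rw [List.mem_map]
      by_cases he : q.1.2 = q.1.1
      · refine ⟨(q.1.1, q.1), ?_, by rw [← he, ← h1]⟩
        rw [List.mem_flatMap]
        refine ⟨q.1, hmem, ?_⟩
        unfold pvEKeys
        rw [if_pos he]
        simp
      · refine ⟨(q.1.2, q.1), ?_, h1.symm⟩
        rw [List.mem_flatMap]
        refine ⟨q.1, hmem, ?_⟩
        unfold pvEKeys
        rw [if_neg he]
        simp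
  refine (Finset.sum_subset hsub ?_).symm
  intro p _ hp
  rw [List.mem_toFinset] at hp
  rw [List.count_eq_zero.mpr hp]
  simp

-- ===== VERDICT (by name: the statement is the Claim_ definition above) =====
theorem find_sides_spec : Claim_equal_find_sides := by
  intro edges _
  unfold Spec_find_sides
  rw [find_sides_eq_sum, find_sides_alt_eq_sum]
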